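-- pv_equiv track=rewrite | github.com/AmDumDee/rossetacode | python/Cousin_primes.py | listTranspose
-- ===== SOURCE A (Python) =====
-- def listTranspose(xss):
--
--     def go(xss):
--         if xss:
--             h, *t = xss
--             return (
--                 [[h[0]] + [xs[0] for xs in t if xs]] + (
--                     go([h[1:]] + [xs[1:] for xs in t])
--                 )
--             ) if h and isinstance(h, list) else go(t)
--         else:
--             return []
--     return go(xss)
-- ===== SOURCE B (Python) =====
-- def listTranspose(xss):
--     m = max((len(r) for r in xss), default=0)
--     return [[r[k] for r in xss if k < len(r)] for k in range(m)]
-- ===== Notes on version B (the rewrite author's own statement) =====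
-- stated objective: faster
-- what changed: Replaces the recursive head-dropping/slicing process (which re-slices every row for every column) with a direct two-level comprehension that reads element k of each sufficiently long row for k up to the maximum row length.
import Mathlib
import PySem

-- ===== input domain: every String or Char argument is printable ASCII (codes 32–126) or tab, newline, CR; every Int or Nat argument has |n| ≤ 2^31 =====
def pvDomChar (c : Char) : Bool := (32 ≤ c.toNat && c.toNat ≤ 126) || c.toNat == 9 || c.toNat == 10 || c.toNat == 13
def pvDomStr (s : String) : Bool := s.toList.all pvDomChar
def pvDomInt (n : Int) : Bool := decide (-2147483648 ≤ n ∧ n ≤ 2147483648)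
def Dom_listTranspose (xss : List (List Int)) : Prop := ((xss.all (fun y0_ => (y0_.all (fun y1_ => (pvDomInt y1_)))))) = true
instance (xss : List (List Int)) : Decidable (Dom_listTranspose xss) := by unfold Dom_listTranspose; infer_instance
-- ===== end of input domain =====

-- B replaces A's recursive head-dropping/slicing transpose with a direct column-by-index
-- construction (one read per element instead of re-slicing every row per column).


-- ===== PORT A =====
-- [xs[1:] for xs in t]
def pvShift (t : List (List Int)) : List (List Int) := t.map (fun xs => xs.drop 1)

-- termination helper for pvGoA (cited by its decreasing_by)
theorem pvSumShiftLe (t : List (List Int)) :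
    (((pvShift t).map List.length).sum) ≤ ((t.map List.length).sum) := by
  unfold pvShift
  rw [List.map_map]
  exact List.sum_le_sum (fun x _ => by simp)

-- inner `go`: `if h (and isinstance(h, list)): column of heads :: go(all rows sliced by 1) else go(t)`
def pvGoA : List (List Int) → List (List Int)
  | [] => []
  | h :: t =>
    if h = [] then pvGoA t
    else
      (h.headI :: (t.filter (fun xs => !xs.isEmpty)).map List.headI)
        :: pvGoA (h.drop 1 :: pvShift t)
termination_by xss => ((xss.map List.length).sum, xss.length)
decreasing_by
  · apply Prod.Lex.right' <;> simp
  · apply Prod.Lex.left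
    have := pvSumShiftLe t
    have hlen : 1 ≤ h.length := by
      cases h with | nil => simp_all | cons a l => simp
    simp only [List.map_cons, List.sum_cons, List.length_drop]
    omega

def listTranspose (xss : List (List Int)) : List (List Int) := pvGoA xss

-- ===== PORT B =====
-- m = max((len(r) for r in xss), default=0); column k = [r[k] for r in xss if k < len(r)]
-- (the guard k < len(r) is exactly `r[k]?` being `some`, so the comprehension is a filterMap)
def listTranspose_alt (xss : List (List Int)) : List (List Int) :=
  let m := PySem.List.maxD (xss.map List.length) (fun n => n) 0
  (List.range m).map (fun k => xss.filterMap (fun r => r[k]?))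

-- ===== PRECONDITION & SPEC =====
def Spec_listTranspose (xss : List (List Int)) (out : List (List Int)) : Prop := out = listTranspose_alt xss
instance (xss : List (List Int)) (out : List (List Int)) : Decidable (Spec_listTranspose xss out) := by unfold Spec_listTranspose; infer_instance

-- ===== CLAIM (what is proved, stated in full; the proofs are below) =====
def Claim_equal_listTranspose : Prop := ∀ (xss : List (List Int)), Dom_listTranspose xss → Spec_listTranspose xss (listTranspose xss)

-- ===== LEMMAS AND PROOFS =====

-- the max of the row lengths, as a plain foldr (proof-side view of maxD)
def pvM (xss : List (List Int)) : Nat := (xss.map List.length).foldr max 0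

theorem pvFoldrMaxSwap (xs : List Nat) (a b : Nat) :
    xs.foldr max (max a b) = max a (xs.foldr max b) := by
  induction xs with
  | nil => rfl
  | cons y ys ih => simp [List.foldr_cons, ih, Nat.max_left_comm]

theorem pvMaxDEq (xss : List (List Int)) :
    PySem.List.maxD (xss.map List.length) (fun n => n) 0 = pvM xss := by
  unfold pvM
  cases hx : xss.map List.length with
  | nil => rfl
  | cons n ns =>
      rw [PySem.List.maxD_id_cons, List.foldl_eq_foldr, List.foldr_cons]
      conv_lhs => rw [show n = max n 0 by omega]
      rw [pvFoldrMaxSwap]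

theorem pvMShift (t : List (List Int)) : pvM (pvShift t) = pvM t - 1 := by
  induction t with
  | nil => rfl
  | cons x xs ih => simp [pvM, pvShift, List.foldr_cons] at ih ⊢; omega

theorem pvColShift (k : Nat) (t : List (List Int)) (h : List Int) :
    (h :: t).filterMap (fun r => r[k + 1]?) =
      (h.drop 1 :: pvShift t).filterMap (fun r => r[k]?) := by
  have hc : (h.drop 1 :: pvShift t) = (h :: t).map (fun xs => xs.drop 1) := by
    simp [pvShift]
  rw [hc, List.filterMap_map]
  exact List.filterMap_congr (fun x _ => by
    simp [Function.comp])

theorem pvColZero (t : List (List Int)) :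
    t.filterMap (fun r => r[0]?) = (t.filter (fun xs => !xs.isEmpty)).map List.headI := by
  induction t with
  | nil => rfl
  | cons r rs ih =>
      cases r with
      | nil => simpa using ih
      | cons a l => simp [ih]

-- convenient unfolding of B's port through pvM
theorem pvAltEq (xss : List (List Int)) :
    listTranspose_alt xss = (List.range (pvM xss)).map (fun k => xss.filterMap (fun r => r[k]?)) := by
  unfold listTranspose_alt
  rw [pvMaxDEq]

theorem pvGoAEqAlt (xss : List (List Int)) : pvGoA xss = listTranspose_alt xss := by
  induction xss using pvGoA.induct with
  | case1 => simp [pvGoA, pvAltEq, pvM]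
  | case2 t ih =>
      rw [pvGoA, if_pos rfl, ih, pvAltEq, pvAltEq]
      simp [pvM]
  | case3 h t hnil ih =>
      rw [pvGoA, if_neg hnil, ih, pvAltEq, pvAltEq]
      have h1 : 1 ≤ h.length := by cases h with | nil => simp_all | cons a l => simp
      have hm : pvM (h :: t) = pvM (h.drop 1 :: pvShift t) + 1 := by
        have := pvMShift t
        simp only [pvM, pvShift, List.map_cons, List.foldr_cons, List.length_drop] at *
        omega
      rw [hm, List.range_succ_eq_map, List.map_cons, List.map_map]
      congr 1
      · have hcons : (h :: t).filterMap (fun r => r[0]?) = h.headI :: t.filterMap (fun r => r[0]?) := by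
          cases h with | nil => simp_all | cons a l => simp
        rw [hcons, pvColZero]
      · apply List.map_congr_left
        intro k _
        exact (pvColShift k t h).symm

-- ===== VERDICT (by name: the statement is the Claim_ definition above) =====
theorem listTranspose_spec : Claim_equal_listTranspose := by
  intro xss _
  unfold Spec_listTranspose listTranspose
  exact pvGoAEqAlt xss
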